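-- pv_equiv track=rewrite | github.com/raccoon-man/hw_compress_demo | first_column_compress.py | find_majority_per_position
-- ===== SOURCE A (Python) =====
-- def find_majority_per_position(lst):
--     if len(lst) == 0:
--         n = 0
--     else:
--         n = len(lst[0])
--     majority_list = []
--     for i in range(n):
--         column = [sub_lst[i] for sub_lst in lst]
--         counts = {}
--         for item in column:
--             if item in counts:
--                 counts[item] += 1
--             else:
--                 counts[item] = 1
--         # 排除模板中的填充符
--         sorted_counts = sorted(counts.items(), key=lambda item: item[1], reverse=True)
--         if sorted_counts[0][0] == '00100000' and len(sorted_counts) > 1: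
--             majority_list.append(sorted_counts[1][0])
--         else:
--             majority_list.append(sorted_counts[0][0])
--     return majority_list
-- ===== SOURCE B (Python) =====
-- def find_majority_per_position(lst):
--     if len(lst) == 0:
--         return []
--     result = []
--     for j in range(len(lst[0])):
--         col = [row[j] for row in lst]
--         seen = []
--         best, bestc, second, secondc = None, -1, None, -1
--         for v in col:
--             if v in seen:
--                 continue
--             seen.append(v)
--             c = col.count(v)
--             if bestc < c:
--                 best, bestc, second, secondc = v, c, best, bestc
--             elif secondc < c:
--                 second, secondc = v, c
--         if best == '00100000' and secondc >= 0:
--             result.append(second)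
--         else:
--             result.append(best)
--     return result
-- ===== Notes on version B (the rewrite author's own statement) =====
-- stated objective: alternative
-- what changed: Drops A's per-column frequency dict and full descending sort entirely: B scans each column once, and at each first occurrence (tracked by a seen list) computes that value's frequency with col.count and updates a running top-two (best, runner-up) accumulator; the padding rule reads these two registers instead of sorted_counts[0]/[1].
import Mathlib
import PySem

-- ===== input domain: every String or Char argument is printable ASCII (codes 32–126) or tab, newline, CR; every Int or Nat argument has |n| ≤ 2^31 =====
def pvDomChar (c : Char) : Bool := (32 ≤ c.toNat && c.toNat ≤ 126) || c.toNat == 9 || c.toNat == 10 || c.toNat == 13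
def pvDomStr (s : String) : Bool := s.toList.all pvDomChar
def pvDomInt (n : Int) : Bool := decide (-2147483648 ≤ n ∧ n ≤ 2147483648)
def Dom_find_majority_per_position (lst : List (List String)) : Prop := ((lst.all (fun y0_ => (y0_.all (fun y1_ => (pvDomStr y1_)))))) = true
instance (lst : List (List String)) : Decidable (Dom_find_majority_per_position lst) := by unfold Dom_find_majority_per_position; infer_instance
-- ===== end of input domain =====

-- B drops A's per-column count dict and descending sort: it scans each column once, computing
-- col.count at each first occurrence (seen list) and keeping a running top-two (best/runner-up);
-- objective: alternative — equal return values (neither function mutates its argument).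

-- ===== PORT A =====
def find_majority_per_position (lst : List (List String)) : List String :=
  let n : Int := if lst.length = 0 then 0 else ((lst.headD []).length : Int)
  (PySem.List.pyRange 0 n 1).foldl (fun acc i =>
    let column := lst.map (fun sub => PySem.List.pyGetD sub i "")
    let counts := column.foldl (fun d item =>
        match d.get? item with
        | some v => d.insert item (v + 1)
        | none => d.insert item 1) (PySem.Dict.empty : PySem.Dict String Int)
    let sc := PySem.List.sorted counts.items (fun kv => kv.2) true
    if (PySem.List.pyGetD sc 0 ("", 0)).1 = "00100000" ∧ 1 < sc.length then
      acc ++ [(PySem.List.pyGetD sc 1 ("", 0)).1]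
    else
      acc ++ [(PySem.List.pyGetD sc 0 ("", 0)).1]) []

-- ===== PORT B =====
-- state p = (seen, best?, bestc, second?, secondc); best/second are Option because Python starts
-- them at None (the None case of the final append is unreachable: lst ≠ [] makes every column
-- nonempty, so '.getD ""' is never consulted on inputs admitted by Pre_).
def find_majority_per_position_alt (lst : List (List String)) : List String :=
  if lst.length = 0 then []
  else
    (PySem.List.pyRange 0 ((lst.headD []).length : Int) 1).foldl (fun result j =>
      let col := lst.map (fun row => PySem.List.pyGetD row j "")
      let st := col.foldl
        (fun (p : List String × Option String × Int × Option String × Int) v =>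
          if v ∈ p.1 then p
          else
            let c : Int := (PySem.List.count col v : Int)
            if p.2.2.1 < c then (p.1 ++ [v], some v, c, p.2.1, p.2.2.1)
            else if p.2.2.2.2 < c then (p.1 ++ [v], p.2.1, p.2.2.1, some v, c)
            else (p.1 ++ [v], p.2))
        ([], none, -1, none, -1)
      if st.2.1 = some "00100000" ∧ 0 ≤ st.2.2.2.2 then result ++ [st.2.2.2.1.getD ""]
      else result ++ [st.2.1.getD ""]) []

-- ===== PRECONDITION & SPEC =====
-- Pre_ excludes exactly the ragged inputs (a row shorter than the first row), on which the
-- Python A raises IndexError (and the Python B raises too); nothing else is excluded.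
def Pre_find_majority_per_position (lst : List (List String)) : Prop :=
  ∀ r ∈ lst, (lst.headD []).length ≤ r.length
instance (lst : List (List String)) : Decidable (Pre_find_majority_per_position lst) := by
  unfold Pre_find_majority_per_position; infer_instance

def pvWitness_find_majority_per_position : List (List String) :=
  [["a", "00100000"], ["a", "b"], ["c", "b"]]

def Spec_find_majority_per_position (lst : List (List String)) (out : List String) : Prop := out = find_majority_per_position_alt lst
instance (lst : List (List String)) (out : List String) : Decidable (Spec_find_majority_per_position lst out) := by unfold Spec_find_majority_per_position; infer_instance

-- ===== CLAIM (what is proved, stated in full; the proofs are below) =====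
def Claim_equal_find_majority_per_position : Prop := ∀ (lst : List (List String)), Dom_find_majority_per_position lst → Pre_find_majority_per_position lst → Spec_find_majority_per_position lst (find_majority_per_position lst)

-- ===== LEMMAS AND PROOFS =====

-- A's selection rule (value picked from the descending stable sort) on one count dict
def pvSelA (d : PySem.Dict String Int) : String :=
  let sc := PySem.List.sorted d.items (fun kv => kv.2) true
  if (PySem.List.pyGetD sc 0 ("", 0)).1 = "00100000" ∧ 1 < sc.length then
    (PySem.List.pyGetD sc 1 ("", 0)).1
  else (PySem.List.pyGetD sc 0 ("", 0)).1

-- B's top-two update on one (value, frequency) pair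
def pvStep (s : Option String × Int × Option String × Int) (kv : String × Int) :
    Option String × Int × Option String × Int :=
  if s.2.1 < kv.2 then (some kv.1, kv.2, s.1, s.2.1)
  else if s.2.2.2 < kv.2 then (s.1, s.2.1, some kv.1, kv.2)
  else s

-- B's column answer, written over the column only
def pvSelB (col : List String) : String :=
  let st := col.foldl
    (fun (p : List String × Option String × Int × Option String × Int) v =>
      if v ∈ p.1 then p
      else
        let c : Int := (PySem.List.count col v : Int)
        if p.2.2.1 < c then (p.1 ++ [v], some v, c, p.2.1, p.2.2.1)
        else if p.2.2.2.2 < c then (p.1 ++ [v], p.2.1, p.2.2.1, some v, c)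
        else (p.1 ++ [v], p.2))
    ([], none, -1, none, -1)
  if st.2.1 = some "00100000" ∧ 0 ≤ st.2.2.2.2 then st.2.2.2.1.getD ""
  else st.2.1.getD ""

theorem pv_max_snoc_none (xs : List (String × Int)) (x : String × Int)
    (h : PySem.List.max? xs (fun kv => kv.2) = none) :
    PySem.List.max? (xs ++ [x]) (fun kv => kv.2) = some x := by
  rw [PySem.List.max?] at h ⊢
  rw [List.foldl_append, h]
  rfl

theorem pv_max_snoc_some (xs : List (String × Int)) (x m : String × Int)
    (h : PySem.List.max? xs (fun kv => kv.2) = some m) :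
    PySem.List.max? (xs ++ [x]) (fun kv => kv.2) = if m.2 < x.2 then some x else some m := by
  rw [PySem.List.max?] at h ⊢
  rw [List.foldl_append, h]
  rfl

theorem pv_sorted_snoc (xs : List (String × Int)) (x : String × Int) :
    PySem.List.sorted (xs ++ [x]) (fun kv => kv.2) true
      = PySem.List.insertBy (fun a b => decide (b.2 < a.2)) x (PySem.List.sorted xs (fun kv => kv.2) true) := by
  simp [PySem.List.sorted, List.foldl_append]

-- head of Python's stable descending sort = Python's max (first maximal element)
theorem pv_head_sorted_rev (xs : List (String × Int)) :
    (PySem.List.sorted xs (fun kv => kv.2) true).head? = PySem.List.max? xs (fun kv => kv.2) := by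
  induction xs using List.reverseRecOn with
  | nil => simp [PySem.List.sorted, PySem.List.max?]
  | append_singleton xs x ih =>
    rw [pv_sorted_snoc]
    cases hsx : PySem.List.sorted xs (fun kv => kv.2) true with
    | nil =>
      have hx : PySem.List.max? xs (fun kv => kv.2) = none := by
        rw [← ih, hsx]; rfl
      rw [pv_max_snoc_none xs x hx]
      rfl
    | cons m t =>
      have hmx : PySem.List.max? xs (fun kv => kv.2) = some m := by
        rw [← ih, hsx]; rfl
      rw [pv_max_snoc_some xs x m hmx]
      by_cases h : m.2 < x.2
      · simp [PySem.List.insertBy, h]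
      · simp [PySem.List.insertBy, h]

-- tail of the stable descending sort of a duplicate-free list = sort of the list minus its first maximum
theorem pv_tail_sorted_rev (xs : List (String × Int)) (hnd : xs.Nodup) (m : String × Int)
    (hm : PySem.List.max? xs (fun kv => kv.2) = some m) :
    (PySem.List.sorted xs (fun kv => kv.2) true).tail
      = PySem.List.sorted (xs.erase m) (fun kv => kv.2) true := by
  induction xs using List.reverseRecOn generalizing m with
  | nil => simp [PySem.List.max?] at hm
  | append_singleton xs x ih =>
    obtain ⟨hnd1, -, hdisj⟩ := List.nodup_append.mp hnd
    have hxnot : x ∉ xs := fun hx => (hdisj x hx x (by simp)) rfl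
    rw [pv_sorted_snoc]
    cases hsx : PySem.List.sorted xs (fun kv => kv.2) true with
    | nil =>
      have hx : xs = [] := (PySem.List.sorted_eq_nil_iff _ _ _).1 hsx
      subst hx
      have hmx : m = x := by
        simp [PySem.List.max?] at hm
        exact hm.symm
      subst hmx
      simp [PySem.List.insertBy, PySem.List.sorted]
    | cons m0 t =>
      have hmx : PySem.List.max? xs (fun kv => kv.2) = some m0 := by
        rw [← pv_head_sorted_rev, hsx]; rfl
      rw [pv_max_snoc_some xs x m0 hmx] at hm
      by_cases h : m0.2 < x.2
      · rw [if_pos h] at hm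
        cases hm
        rw [List.erase_append_right _ hxnot]
        simp only [List.erase_cons_head, List.append_nil]
        simp only [PySem.List.insertBy, h, decide_true, if_true]
        exact hsx.symm
      · rw [if_neg h] at hm
        obtain rfl : m0 = m := by injection hm
        have hmem : m0 ∈ xs := PySem.List.max?_mem hmx
        rw [List.erase_append_left _ hmem, pv_sorted_snoc]
        have ht : t = PySem.List.sorted (xs.erase m0) (fun kv => kv.2) true := by
          rw [← ih hnd1 m0 hmx, hsx]
          rfl
        rw [← ht]
        simp [PySem.List.insertBy, h]

-- A's branchy counting loop is the standard counter loop
theorem pv_countA_eq_counter (col : List String) :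
    col.foldl (fun d item =>
        match d.get? item with
        | some v => d.insert item (v + 1)
        | none => d.insert item 1) (PySem.Dict.empty : PySem.Dict String Int)
      = PySem.Dict.counter col := by
  have hfun : (fun (d : PySem.Dict String Int) item =>
        match d.get? item with
        | some v => d.insert item (v + 1)
        | none => d.insert item 1)
      = fun (d : PySem.Dict String Int) item => d.insert item (d.getD item 0 + 1) := by
    funext d item
    cases hg : d.get? item with
    | none => simp [PySem.Dict.getD, hg]
    | some v => simp [PySem.Dict.getD, hg]
  rw [hfun, PySem.Dict.foldl_insert_getD_add_one_eq_counter]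

-- the original seen list is a prefix of any Set.add fold extending it
theorem pv_prefix_foldl_add (col : List String) (seen : List String) :
    seen <+: col.foldl PySem.Set.add seen := by
  induction col generalizing seen with
  | nil => exact List.prefix_refl seen
  | cons v rest ih =>
    refine List.IsPrefix.trans ?_ (ih (PySem.Set.add seen v))
    by_cases h : v ∈ seen
    · simp [PySem.Set.add, PySem.Set.contains, h]
    · simp [PySem.Set.add, PySem.Set.contains, h]

-- B's seen-guarded loop with a generic accumulator update: the accumulator sees exactly
-- the values newly appended to seen, in order
theorem pv_seen_fold {σ : Type} (g : σ → String → σ) (col : List String)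
    (seen : List String) (s : σ) :
    col.foldl (fun (p : List String × σ) v => if v ∈ p.1 then p else (p.1 ++ [v], g p.2 v)) (seen, s)
    = (col.foldl PySem.Set.add seen,
       ((col.foldl PySem.Set.add seen).drop seen.length).foldl g s) := by
  induction col generalizing seen s with
  | nil => simp
  | cons v rest ih =>
    by_cases h : v ∈ seen
    · have hadd : PySem.Set.add seen v = seen := by
        simp [PySem.Set.add, PySem.Set.contains, h]
      simp only [List.foldl_cons, if_pos h, hadd, ih]
    · have hadd : PySem.Set.add seen v = seen ++ [v] := by
        simp [PySem.Set.add, PySem.Set.contains, h]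
      simp only [List.foldl_cons, if_neg h, hadd, ih]
      rw [Prod.mk.injEq]
      refine ⟨rfl, ?_⟩
      obtain ⟨t, ht⟩ := pv_prefix_foldl_add rest (seen ++ [v])
      rw [← ht]
      have h1 : (seen ++ [v] ++ t).drop seen.length = v :: t := by
        rw [List.append_assoc, List.drop_left]; rfl
      have h2 : (seen ++ [v] ++ t).drop (seen ++ [v]).length = t := List.drop_left
      rw [h1, h2]
      simp

-- the intended value of the top-two fold, phrased through Python's max? (first maximal element)
def pvTop1 : Option (String × Int) → Option String × Int
  | none => (none, -1)
  | some m2 => (some m2.1, m2.2)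

def pvTop2spec (xs : List (String × Int)) : Option String × Int × Option String × Int :=
  match PySem.List.max? xs (fun kv => kv.2) with
  | none => (none, -1, none, -1)
  | some m => (some m.1, m.2, pvTop1 (PySem.List.max? (xs.erase m) (fun kv => kv.2)))

theorem pvTop2spec_none (xs : List (String × Int))
    (h : PySem.List.max? xs (fun kv => kv.2) = none) :
    pvTop2spec xs = (none, -1, none, -1) := by
  unfold pvTop2spec; rw [h]

theorem pvTop2spec_some (xs : List (String × Int)) (m : String × Int)
    (h : PySem.List.max? xs (fun kv => kv.2) = some m) :
    pvTop2spec xs = (some m.1, m.2, pvTop1 (PySem.List.max? (xs.erase m) (fun kv => kv.2))) := by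
  unfold pvTop2spec; rw [h]

-- B's column scan is the top-two fold over the counter's (value, count) items
theorem pv_scan_eq_top2 (col : List String) :
    (col.foldl
      (fun (p : List String × Option String × Int × Option String × Int) v =>
        if v ∈ p.1 then p
        else
          let c : Int := (PySem.List.count col v : Int)
          if p.2.2.1 < c then (p.1 ++ [v], some v, c, p.2.1, p.2.2.1)
          else if p.2.2.2.2 < c then (p.1 ++ [v], p.2.1, p.2.2.1, some v, c)
          else (p.1 ++ [v], p.2))
      ([], none, -1, none, -1)).2
    = (PySem.Dict.counter col).items.foldl pvStep (none, -1, none, -1) := by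
  have hbody : (fun (p : List String × Option String × Int × Option String × Int) v =>
        if v ∈ p.1 then p
        else
          let c : Int := (PySem.List.count col v : Int)
          if p.2.2.1 < c then (p.1 ++ [v], some v, c, p.2.1, p.2.2.1)
          else if p.2.2.2.2 < c then (p.1 ++ [v], p.2.1, p.2.2.1, some v, c)
          else (p.1 ++ [v], p.2))
      = fun p v => if v ∈ p.1 then p
          else (p.1 ++ [v], pvStep p.2 (v, (PySem.List.count col v : Int))) := by
    funext p v
    by_cases h : v ∈ p.1
    · simp [h]
    · simp only [if_neg h, pvStep]
      split_ifs <;> rfl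
  rw [hbody, pv_seen_fold (fun s v => pvStep s (v, (PySem.List.count col v : Int))) col [] _]
  rw [PySem.Dict.items_counter, List.foldl_map]
  have hof : col.foldl PySem.Set.add [] = PySem.Set.ofList col := by
    rw [PySem.Set.ofList_eq_foldl]
  rw [hof]
  rfl

-- the top-two fold computes the first maximum and the first maximum of the rest
theorem pv_top2_spec (xs : List (String × Int)) (hnn : ∀ kv ∈ xs, 0 ≤ kv.2) :
    xs.foldl pvStep (none, -1, none, -1) = pvTop2spec xs := by
  induction xs using List.reverseRecOn with
  | nil => simp [pvTop2spec, PySem.List.max?]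
  | append_singleton xs x ih =>
    have hnn' : ∀ kv ∈ xs, 0 ≤ kv.2 := fun kv hkv => hnn kv (by simp [hkv])
    have hnx : 0 ≤ x.2 := hnn x (by simp)
    rw [List.foldl_append, List.foldl_cons, List.foldl_nil, ih hnn']
    cases hm : PySem.List.max? xs (fun kv => kv.2) with
    | none =>
      have hxs : xs = [] := (PySem.List.max?_eq_none_iff _ _).1 hm
      subst hxs
      rw [pvTop2spec_none _ hm, pvTop2spec_some _ x (pv_max_snoc_none [] x hm)]
      simp only [List.nil_append, List.erase_cons_head]
      rw [pvStep]
      simp [show ((-1 : Int) < x.2) from by omega, pvTop1, PySem.List.max?]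
    | some m =>
      rw [pvTop2spec_some _ m hm]
      by_cases h : m.2 < x.2
      · have hmax : PySem.List.max? (xs ++ [x]) (fun kv => kv.2) = some x := by
          rw [pv_max_snoc_some xs x m hm, if_pos h]
        rw [pvTop2spec_some _ x hmax]
        have hxnot : x ∉ xs := by
          intro hx
          have := PySem.List.max?_isMax hm x hx
          omega
        rw [List.erase_append_right _ hxnot, List.erase_cons_head, List.append_nil, hm]
        rw [pvStep]
        simp [h, pvTop1]
      · have hmax : PySem.List.max? (xs ++ [x]) (fun kv => kv.2) = some m := by
          rw [pv_max_snoc_some xs x m hm, if_neg h]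
        rw [pvTop2spec_some _ m hmax]
        have hmem : m ∈ xs := PySem.List.max?_mem hm
        rw [List.erase_append_left _ hmem]
        cases hm2 : PySem.List.max? (xs.erase m) (fun kv => kv.2) with
        | none =>
          rw [pv_max_snoc_none _ x hm2]
          simp only [pvStep, pvTop1]
          simp [show ¬ (m.2 < x.2) from h, show ((-1 : Int) < x.2) from by omega]
        | some m2 =>
          rw [pv_max_snoc_some _ x m2 hm2]
          simp only [pvStep, pvTop1]
          by_cases h2 : m2.2 < x.2
          · rw [if_pos h2]
            simp [h, h2]
          · rw [if_neg h2]
            simp [h, h2]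

-- the two selection rules agree on any nonempty column
theorem pv_sel_eq (col : List String) (hne : col ≠ []) :
    pvSelA (PySem.Dict.counter col) = pvSelB col := by
  have hnn : ∀ kv ∈ (PySem.Dict.counter col).items, 0 ≤ kv.2 := by
    intro kv hkv
    rw [PySem.Dict.items_counter] at hkv
    obtain ⟨k, -, rfl⟩ := List.mem_map.mp hkv
    exact Int.natCast_nonneg _
  have hndi : (PySem.Dict.counter col).items.Nodup := by
    have hnd := PySem.Dict.nodup_keys_counter col
    exact List.Nodup.of_map (fun kv => kv.1) (by simpa [PySem.Dict.keys] using hnd)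
  rw [pvSelA, pvSelB]
  rw [pv_scan_eq_top2, pv_top2_spec _ hnn]
  cases hb : PySem.List.max? (PySem.Dict.counter col).items (fun kv => kv.2) with
  | none =>
    exfalso
    have hitems : (PySem.Dict.counter col).items = [] := (PySem.List.max?_eq_none_iff _ _).1 hb
    rw [PySem.Dict.items_counter, List.map_eq_nil_iff] at hitems
    obtain ⟨v, rest, rfl⟩ := List.exists_cons_of_ne_nil hne
    have : v ∈ PySem.Set.ofList (v :: rest) := by
      rw [PySem.Set.mem_ofList]; simp
    rw [hitems] at this
    simp at this
  | some m =>
    rw [pvTop2spec_some _ m hb]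
    have hhead : (PySem.List.sorted (PySem.Dict.counter col).items (fun kv => kv.2) true).head?
        = some m := by rw [pv_head_sorted_rev, hb]
    cases hs : PySem.List.sorted (PySem.Dict.counter col).items (fun kv => kv.2) true with
    | nil => rw [hs] at hhead; simp at hhead
    | cons b0 t =>
      rw [hs] at hhead
      obtain rfl : b0 = m := by injection hhead
      have hlen := PySem.List.length_sorted (PySem.Dict.counter col).items (fun kv => kv.2) true
      rw [hs] at hlen
      have h0 : PySem.List.pyGetD (b0 :: t) 0 ("", 0) = b0 := by
        simp [PySem.List.pyGetD, PySem.List.pyGet?, PySem.List.pyIdx?]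
      have hmem : b0 ∈ (PySem.Dict.counter col).items := PySem.List.max?_mem hb
      have htail : t = PySem.List.sorted ((PySem.Dict.counter col).items.erase b0)
          (fun kv => kv.2) true := by
        have h := pv_tail_sorted_rev _ hndi b0 hb
        rw [hs] at h
        exact h
      cases hb2 : PySem.List.max? ((PySem.Dict.counter col).items.erase b0) (fun kv => kv.2) with
      | none =>
        -- no runner-up: the dict has a single entry, both sides pick b0
        have h3 : (PySem.Dict.counter col).items.erase b0 = [] :=
          (PySem.List.max?_eq_none_iff _ _).1 hb2
        have ht0 : t = [] := by
          rw [htail, h3]; simp [PySem.List.sorted]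
        subst ht0
        simp only [pvTop1]
        rw [h0]
        rw [if_neg (by simp), if_neg (by norm_num)]
        rfl
      | some m2 =>
        have hm2nn : 0 ≤ m2.2 :=
          hnn m2 (List.mem_of_mem_erase (PySem.List.max?_mem hb2))
        have hh2 : (PySem.List.sorted ((PySem.Dict.counter col).items.erase b0)
            (fun kv => kv.2) true).head? = some m2 := by rw [pv_head_sorted_rev, hb2]
        rw [← htail] at hh2
        cases t with
        | nil =>
          exfalso
          have h3 : (PySem.Dict.counter col).items.erase b0 = [] :=
            (PySem.List.sorted_eq_nil_iff _ _ _).1 htail.symm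
          rw [h3] at hb2
          simp [PySem.List.max?] at hb2
        | cons c t2 =>
          have hcm : c = m2 := by injection hh2
          subst hcm
          have h1 : PySem.List.pyGetD (b0 :: c :: t2) 1 ("", 0) = c := by
            simp [PySem.List.pyGetD, PySem.List.pyGet?, PySem.List.pyIdx?]
          simp only [pvTop1]
          rw [h0, h1]
          by_cases hc : b0.1 = "00100000"
          · rw [if_pos (by simp [hc]), if_pos (by exact ⟨by simp [hc], hm2nn⟩)]
            rfl
          · rw [if_neg (by simp [hc]), if_neg (by simp [hc])]
            rfl

-- A's output loop is a map of pvSelA over the counters of the columns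
theorem pv_A_loop (lst : List (List String)) (l : List Int) (acc : List String) :
    l.foldl (fun acc i =>
      if (PySem.List.pyGetD (PySem.List.sorted ((lst.map (fun sub => PySem.List.pyGetD sub i "")).foldl
            (fun d item =>
              match d.get? item with
              | some v => d.insert item (v + 1)
              | none => d.insert item 1) (PySem.Dict.empty : PySem.Dict String Int)).items
            (fun kv => kv.2) true) 0 ("", 0)).1 = "00100000" ∧
          1 < (PySem.List.sorted ((lst.map (fun sub => PySem.List.pyGetD sub i "")).foldl
            (fun d item =>
              match d.get? item with
              | some v => d.insert item (v + 1)
              | none => d.insert item 1) (PySem.Dict.empty : PySem.Dict String Int)).items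
            (fun kv => kv.2) true).length then
        acc ++ [(PySem.List.pyGetD (PySem.List.sorted ((lst.map (fun sub => PySem.List.pyGetD sub i "")).foldl
            (fun d item =>
              match d.get? item with
              | some v => d.insert item (v + 1)
              | none => d.insert item 1) (PySem.Dict.empty : PySem.Dict String Int)).items
            (fun kv => kv.2) true) 1 ("", 0)).1]
      else
        acc ++ [(PySem.List.pyGetD (PySem.List.sorted ((lst.map (fun sub => PySem.List.pyGetD sub i "")).foldl
            (fun d item =>
              match d.get? item with
              | some v => d.insert item (v + 1)
              | none => d.insert item 1) (PySem.Dict.empty : PySem.Dict String Int)).items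
            (fun kv => kv.2) true) 0 ("", 0)).1]) acc
    = acc ++ l.map (fun i =>
        pvSelA (PySem.Dict.counter (lst.map (fun sub => PySem.List.pyGetD sub i "")))) := by
  induction l generalizing acc with
  | nil => simp
  | cons i l ih =>
    rw [List.foldl_cons, ih, List.map_cons]
    simp only [pvSelA, pv_countA_eq_counter]
    split_ifs <;> simp

-- B's output loop is a map of pvSelB over the columns
theorem pv_B_loop (lst : List (List String)) (l : List Int) (acc : List String) :
    l.foldl (fun result j =>
      let col := lst.map (fun row => PySem.List.pyGetD row j "")
      let st := col.foldl
        (fun (p : List String × Option String × Int × Option String × Int) v =>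
          if v ∈ p.1 then p
          else
            let c : Int := (PySem.List.count col v : Int)
            if p.2.2.1 < c then (p.1 ++ [v], some v, c, p.2.1, p.2.2.1)
            else if p.2.2.2.2 < c then (p.1 ++ [v], p.2.1, p.2.2.1, some v, c)
            else (p.1 ++ [v], p.2))
        ([], none, -1, none, -1)
      if st.2.1 = some "00100000" ∧ 0 ≤ st.2.2.2.2 then result ++ [st.2.2.2.1.getD ""]
      else result ++ [st.2.1.getD ""]) acc
    = acc ++ l.map (fun j => pvSelB (lst.map (fun row => PySem.List.pyGetD row j ""))) := by
  induction l generalizing acc with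
  | nil => simp
  | cons j l ih =>
    rw [List.foldl_cons, ih, List.map_cons]
    simp only [pvSelB]
    split_ifs <;> simp

theorem pv_main (lst : List (List String)) :
    find_majority_per_position lst = find_majority_per_position_alt lst := by
  cases lst with
  | nil => rfl
  | cons r rest =>
    rw [find_majority_per_position, find_majority_per_position_alt]
    simp only [List.length_cons, List.headD_cons, Nat.succ_ne_zero, if_false]
    rw [pv_A_loop, pv_B_loop]
    simp only [List.nil_append]
    apply List.map_congr_left
    intro j hj
    exact pv_sel_eq _ (by simp)

-- ===== VERDICT (by name: the statement is the Claim_ definition above) =====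
theorem find_majority_per_position_spec : Claim_equal_find_majority_per_position := by
  intro lst _ _
  unfold Spec_find_majority_per_position
  exact pv_main lst
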